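-- pv_equiv track=rewrite | github.com/Atharva-Rajan-Kale/dlc-automation | sagemaker_test_agent.py | filter_errors_only
-- ===== SOURCE A (Python) =====
-- def filter_errors_only(test_output:str) -> str:
--     """Filter test output to contain only errors, removing warnings"""
--     lines=test_output.split('\n')
--     error_lines=[]
--     for line in lines:
--         if any(warn in line.upper() for warn in ['WARNING', 'WARN', 'DEPRECAT', 'FUTURE']):
--             continue
--         if any(error in line.upper() for error in ['ERROR', 'FAILED', 'EXCEPTION', 'TRACEBACK']):
--             error_lines.append(line)
--         elif error_lines and line.strip():
--             error_lines.append(line)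
--         elif not line.strip() and error_lines:
--             error_lines.append(line)
--     return '\n'.join(error_lines)
-- ===== SOURCE B (Python) =====
-- def filter_errors_only(test_output: str) -> str:
--     """Filter test output to contain only errors, removing warnings"""
--     WARNS = ['WARNING', 'WARN', 'DEPRECAT', 'FUTURE']
--     ERRORS = ['ERROR', 'FAILED', 'EXCEPTION', 'TRACEBACK']
--     lines = test_output.split('\n')
--     start = None
--     for i, line in enumerate(lines):
--         u = line.upper()
--         if any(w in u for w in WARNS):
--             continue
--         if any(e in u for e in ERRORS):
--             start = i
--             break
--     if start is None:
--         return ''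
--     return '\n'.join(l for l in lines[start:]
--                      if not any(w in l.upper() for w in WARNS))
-- ===== Notes on version B (the rewrite author's own statement) =====
-- stated objective: alternative
-- what changed: Replaced A's single-pass accumulator state machine (whose non-error branches depend on whether lines were already collected) by a two-phase structure: locate the index of the first non-warning line containing an error keyword, then filter warning lines out of the tail from that index and join.
import Mathlib
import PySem

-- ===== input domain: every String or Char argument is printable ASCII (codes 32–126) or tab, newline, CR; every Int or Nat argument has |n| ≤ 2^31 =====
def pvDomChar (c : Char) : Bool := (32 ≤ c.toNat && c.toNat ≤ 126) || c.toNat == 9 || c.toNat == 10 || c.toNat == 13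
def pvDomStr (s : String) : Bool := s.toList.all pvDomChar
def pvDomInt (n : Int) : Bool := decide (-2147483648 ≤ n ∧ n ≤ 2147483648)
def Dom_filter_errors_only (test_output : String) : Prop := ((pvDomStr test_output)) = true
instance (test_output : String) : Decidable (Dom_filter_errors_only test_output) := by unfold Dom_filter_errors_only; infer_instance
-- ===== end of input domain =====

-- B replaces A's one-pass flag/accumulator loop by locate-first-error-line then filter the tail (alternative decomposition, same cost).

-- ===== PORT A =====
-- 'any(warn in line.upper() for warn in [...])'
def pvIsWarn (line : String) : Bool :=
  (["WARNING", "WARN", "DEPRECAT", "FUTURE"]).any (fun w => PySem.Str.isIn w (PySem.Str.upper line))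
-- 'any(error in line.upper() for error in [...])'
def pvIsErr (line : String) : Bool :=
  (["ERROR", "FAILED", "EXCEPTION", "TRACEBACK"]).any (fun e => PySem.Str.isIn e (PySem.Str.upper line))

def pvStepA (acc : List String) (line : String) : List String :=
  if pvIsWarn line then acc
  else if pvIsErr line then acc ++ [line]
  else if acc ≠ [] ∧ PySem.Str.strip line ≠ "" then acc ++ [line]
  else if PySem.Str.strip line = "" ∧ acc ≠ [] then acc ++ [line]
  else acc

def filter_errors_only (test_output : String) : String :=
  let lines := (PySem.Str.split? test_output "\n").getD []
  let error_lines := lines.foldl pvStepA []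
  PySem.Str.join "\n" error_lines

-- ===== PORT B =====
-- first loop of B: find the index of the first non-warning line containing an error keyword
def pvFindStart : List String → Nat → Option Nat
  | [], _ => none
  | line :: rest, i =>
    if pvIsWarn line then pvFindStart rest (i + 1)
    else if pvIsErr line then some i
    else pvFindStart rest (i + 1)

def filter_errors_only_alt (test_output : String) : String :=
  let lines := (PySem.Str.split? test_output "\n").getD []
  match pvFindStart lines 0 with
  | none => ""
  | some start => PySem.Str.join "\n" ((lines.drop start).filter (fun l => !pvIsWarn l))

-- ===== PRECONDITION & SPEC =====
def Spec_filter_errors_only (test_output : String) (out : String) : Prop := out = filter_errors_only_alt test_output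
instance (test_output : String) (out : String) : Decidable (Spec_filter_errors_only test_output out) := by unfold Spec_filter_errors_only; infer_instance

-- ===== CLAIM (what is proved, stated in full; the proofs are below) =====
def Claim_equal_filter_errors_only : Prop := ∀ (test_output : String), Dom_filter_errors_only test_output → Spec_filter_errors_only test_output (filter_errors_only test_output)

-- ===== LEMMAS AND PROOFS =====

-- once the accumulator is nonempty, A appends exactly every non-warning line
lemma pvFoldA_tail (ls : List String) :
    ∀ acc : List String, acc ≠ [] →
      ls.foldl pvStepA acc = acc ++ ls.filter (fun l => !pvIsWarn l) := by
  induction ls with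
  | nil => intro acc _; simp
  | cons l ls ih =>
    intro acc hacc
    by_cases hw : pvIsWarn l
    · simp [List.foldl, pvStepA, hw, ih acc hacc]
    · have hstep : pvStepA acc l = acc ++ [l] := by
        unfold pvStepA
        simp only [hw]
        by_cases he : pvIsErr l
        · simp [he]
        · by_cases hs : PySem.Str.strip l = ""
          · simp [he, hs, hacc]
          · simp [he, hs, hacc]
      have hne : acc ++ [l] ≠ [] := by simp
      simp only [List.foldl, hstep, ih _ hne, List.filter_cons, hw]
      simp

lemma pvFindStart_cons (l : String) (rest : List String) (i : Nat) :
    pvFindStart (l :: rest) i =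
      (if pvIsWarn l then pvFindStart rest (i + 1)
       else if pvIsErr l then some i
       else pvFindStart rest (i + 1)) := rfl

lemma pvFindStart_ge (ls : List String) :
    ∀ n s, pvFindStart ls n = some s → n ≤ s := by
  induction ls with
  | nil => intro n s h; simp [pvFindStart] at h
  | cons l ls ih =>
    intro n s h
    rw [pvFindStart_cons] at h
    by_cases hw : pvIsWarn l
    · simp only [hw, if_true] at h; exact Nat.le_of_succ_le (ih (n+1) s h)
    · by_cases he : pvIsErr l
      · simp [hw, he] at h
        omega
      · simp only [hw, he, Bool.false_eq_true, if_false] at h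
        exact Nat.le_of_succ_le (ih (n+1) s h)

lemma pvFoldA_main (ls : List String) :
    ∀ n : Nat, ls.foldl pvStepA [] =
      (match pvFindStart ls n with
       | none => []
       | some s => (ls.drop (s - n)).filter (fun l => !pvIsWarn l)) := by
  induction ls with
  | nil => intro n; rfl
  | cons l ls ih =>
    intro n
    by_cases hw : pvIsWarn l
    · have hstep : pvStepA [] l = [] := by simp [pvStepA, hw]
      simp only [List.foldl, hstep]
      rw [ih (n+1)]
      rw [pvFindStart_cons]
      simp only [hw, if_true]
      cases hfs : pvFindStart ls (n+1) with
      | none => rfl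
      | some s =>
        have hge := pvFindStart_ge ls (n+1) s hfs
        have : s - n = (s - (n+1)) + 1 := by omega
        simp [this]
    · by_cases he : pvIsErr l
      · have hstep : pvStepA [] l = [l] := by simp [pvStepA, hw, he]
        simp only [List.foldl, hstep]
        rw [pvFoldA_tail ls [l] (by simp)]
        rw [pvFindStart_cons]
        simp [hw, he]
      · have hstep : pvStepA [] l = [] := by simp [pvStepA, hw, he]
        simp only [List.foldl, hstep]
        rw [ih (n+1)]
        rw [pvFindStart_cons]
        simp only [hw, he]
        cases hfs : pvFindStart ls (n+1) with
        | none => rfl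
        | some s =>
          have hge := pvFindStart_ge ls (n+1) s hfs
          have : s - n = (s - (n+1)) + 1 := by omega
          simp [this]

lemma pvFinal (L : List String) :
    PySem.Str.join "\n" (L.foldl pvStepA []) =
      (match pvFindStart L 0 with
       | none => ""
       | some start => PySem.Str.join "\n" ((L.drop start).filter (fun l => !pvIsWarn l))) := by
  rw [pvFoldA_main L 0]
  cases hfs : pvFindStart L 0 with
  | none => simp [PySem.Str.join]
  | some s => simp

-- ===== VERDICT (by name: the statement is the Claim_ definition above) =====
theorem filter_errors_only_spec : Claim_equal_filter_errors_only := by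
  intro test_output _
  show filter_errors_only test_output = filter_errors_only_alt test_output
  exact pvFinal ((PySem.Str.split? test_output "\n").getD [])
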